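-- pv_equiv track=rewrite | github.com/partum55/cp-2-genetic-algoritms | automata/fsm.py | get_neighborhood_deltas
-- ===== SOURCE A (Python) =====
-- def get_neighborhood_deltas(neighborhood):
--     positions = []
--     center = None
--     width = len(neighborhood)
--     height = len(neighborhood[0])
--     for j in range(height):
--         for i in range(width):
--             if neighborhood[j][i] == 1:
--                 positions.append((j, i))
--             elif neighborhood[j][i] == 2:
--                 center = (j, i)
--     return [(j[0] - center[0], j[1] - center[1]) for j in positions]
-- ===== SOURCE B (Python) =====
-- def get_neighborhood_deltas(neighborhood):
--     width = len(neighborhood)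
--     height = len(neighborhood[0])
--     cells = [(j, i) for j in range(height) for i in range(width)]
--     center = next(((j, i) for (j, i) in reversed(cells)
--                    if neighborhood[j][i] == 2), None)
--     return [(j - center[0], i - center[1])
--             for (j, i) in cells if neighborhood[j][i] == 1]
-- ===== Notes on version B (the rewrite author's own statement) =====
-- stated objective: alternative
-- what changed: A's single stateful scan that accumulates a positions list and overwrites center is replaced by a reversed find for the last 2-cell plus one comprehension over the cell grid that emits the deltas directly, never building an intermediate positions list.
import Mathlib
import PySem

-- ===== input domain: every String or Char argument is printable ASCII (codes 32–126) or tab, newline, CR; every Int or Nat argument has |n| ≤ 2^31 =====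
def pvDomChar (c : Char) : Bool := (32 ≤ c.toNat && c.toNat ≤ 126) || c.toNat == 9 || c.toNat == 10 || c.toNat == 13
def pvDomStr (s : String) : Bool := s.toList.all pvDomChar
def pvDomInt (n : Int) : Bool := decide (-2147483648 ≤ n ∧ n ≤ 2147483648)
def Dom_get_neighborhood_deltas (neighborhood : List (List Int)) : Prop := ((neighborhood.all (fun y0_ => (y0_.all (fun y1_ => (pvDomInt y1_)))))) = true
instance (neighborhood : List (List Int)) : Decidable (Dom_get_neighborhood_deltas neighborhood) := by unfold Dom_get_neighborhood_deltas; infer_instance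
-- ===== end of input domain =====

-- B replaces A's single stateful scan (positions list + overwritten center) by a reversed
-- find? for the last 2-cell and one comprehension emitting the deltas directly (objective:
-- alternative decomposition, same cost).

-- ===== PORT A =====
-- single scan: accumulate positions, overwrite center; then subtract center from each position
def get_neighborhood_deltas (neighborhood : List (List Int)) : List (Int × Int) :=
  let width := neighborhood.length
  let height := (neighborhood.headD []).length
  let st := (List.range height).foldl (fun st j =>
      (List.range width).foldl (fun st i =>
        if (neighborhood.getD j []).getD i 0 == 1 then (st.1 ++ [((j : Int), (i : Int))], st.2)
        else if (neighborhood.getD j []).getD i 0 == 2 then (st.1, some ((j : Int), (i : Int)))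
        else st) st)
    (([] : List (Int × Int)), (none : Option (Int × Int)))
  st.1.map (fun p => (p.1 - (st.2.getD (0, 0)).1, p.2 - (st.2.getD (0, 0)).2))

-- ===== PORT B =====
-- reversed search for the last 2-cell, then emit deltas directly from the 1-cells
def get_neighborhood_deltas_alt (neighborhood : List (List Int)) : List (Int × Int) :=
  let width := neighborhood.length
  let height := (neighborhood.headD []).length
  let cells := (List.range height).flatMap (fun j => (List.range width).map (fun i => (j, i)))
  let center := cells.reverse.find? (fun c => (neighborhood.getD c.1 []).getD c.2 0 == 2)
  (cells.filter (fun c => (neighborhood.getD c.1 []).getD c.2 0 == 1)).map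
    (fun c => ((c.1 : Int) - ((center.getD (0, 0)).1 : Int),
               (c.2 : Int) - ((center.getD (0, 0)).2 : Int)))

-- ===== PRECONDITION & SPEC =====
-- Pre_ is exactly where the Python A returns: a nonempty grid, the scanned j-range inside the
-- outer list, every scanned row long enough (else IndexError), and no 1-cell without some
-- 2-cell in the scanned region (else A subscripts a None center: TypeError).
def Pre_get_neighborhood_deltas (neighborhood : List (List Int)) : Prop :=
  neighborhood ≠ [] ∧
  (neighborhood.headD []).length ≤ neighborhood.length ∧
  (∀ j < (neighborhood.headD []).length, neighborhood.length ≤ (neighborhood.getD j []).length) ∧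
  ((∃ j < (neighborhood.headD []).length, ∃ i < neighborhood.length,
      (neighborhood.getD j []).getD i 0 = 1) →
   (∃ j < (neighborhood.headD []).length, ∃ i < neighborhood.length,
      (neighborhood.getD j []).getD i 0 = 2))
instance (neighborhood : List (List Int)) : Decidable (Pre_get_neighborhood_deltas neighborhood) := by
  unfold Pre_get_neighborhood_deltas; infer_instance

def pvWitness_get_neighborhood_deltas : List (List Int) := [[1, 2], [0, 0]]

def Spec_get_neighborhood_deltas (neighborhood : List (List Int)) (out : List (Int × Int)) : Prop := out = get_neighborhood_deltas_alt neighborhood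
instance (neighborhood : List (List Int)) (out : List (Int × Int)) : Decidable (Spec_get_neighborhood_deltas neighborhood out) := by unfold Spec_get_neighborhood_deltas; infer_instance

-- ===== CLAIM (what is proved, stated in full; the proofs are below) =====
def Claim_equal_get_neighborhood_deltas : Prop := ∀ (neighborhood : List (List Int)), Dom_get_neighborhood_deltas neighborhood → Pre_get_neighborhood_deltas neighborhood → Spec_get_neighborhood_deltas neighborhood (get_neighborhood_deltas neighborhood)

-- ===== LEMMAS AND PROOFS =====

def pvCast (c : Nat × Nat) : Int × Int := ((c.1 : Int), (c.2 : Int))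

-- invariant of A's loop body over an arbitrary cell list
theorem pv_loop_spec (g : Nat × Nat → Int) :
    ∀ (cells : List (Nat × Nat)) (acc : List (Int × Int)) (c : Option (Int × Int)),
    cells.foldl (fun st x =>
        if g x = 1 then (st.1 ++ [pvCast x], st.2)
        else if g x = 2 then (st.1, some (pvCast x))
        else st) (acc, c)
    = (acc ++ (cells.filter (fun x => g x == 1)).map pvCast,
       (cells.reverse.find? (fun x => g x == 2)).elim c (fun x => some (pvCast x))) := by
  intro cells
  induction cells with
  | nil => intro acc c; simp
  | cons x xs ih =>
    intro acc c
    by_cases h1 : g x = 1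
    · simp [List.foldl_cons, h1, ih, List.find?_append]
    · by_cases h2 : g x = 2
      · simp [List.foldl_cons, h2, ih, List.find?_append]
        cases xs.reverse.find? (fun x => g x == 2) <;> simp
      · simp [List.foldl_cons, h1, h2, ih, List.find?_append]

-- the nested range fold of A, flattened and characterized via pv_loop_spec
theorem pv_aux (nb : List (List Int)) :
    (List.range (nb.headD []).length).foldl (fun st j =>
        (List.range nb.length).foldl (fun st i =>
          if (nb.getD j []).getD i 0 = 1 then (st.1 ++ [((j : Int), (i : Int))], st.2)
          else if (nb.getD j []).getD i 0 = 2 then (st.1, some ((j : Int), (i : Int)))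
          else st) st)
      (([] : List (Int × Int)), (none : Option (Int × Int)))
    = ((((List.range (nb.headD []).length).flatMap (fun j => (List.range nb.length).map (fun i => (j, i)))).filter
          (fun c => (nb.getD c.1 []).getD c.2 0 == 1)).map pvCast,
       ((((List.range (nb.headD []).length).flatMap (fun j => (List.range nb.length).map (fun i => (j, i)))).reverse.find?
          (fun c => (nb.getD c.1 []).getD c.2 0 == 2)).elim none (fun x => some (pvCast x)))) := by
  have h2 : (((List.range (nb.headD []).length).flatMap
        (fun j => (List.range nb.length).map (fun i => (j, i)))).foldl (fun st (x : Nat × Nat) =>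
          if (nb.getD x.1 []).getD x.2 0 = 1 then (st.1 ++ [pvCast x], st.2)
          else if (nb.getD x.1 []).getD x.2 0 = 2 then (st.1, some (pvCast x))
          else st)
        (([] : List (Int × Int)), (none : Option (Int × Int))))
      = (List.range (nb.headD []).length).foldl (fun st j =>
          (List.range nb.length).foldl (fun st i =>
            if (nb.getD j []).getD i 0 = 1 then (st.1 ++ [((j : Int), (i : Int))], st.2)
            else if (nb.getD j []).getD i 0 = 2 then (st.1, some ((j : Int), (i : Int)))
            else st) st)
        (([] : List (Int × Int)), (none : Option (Int × Int))) := by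
    simp [List.foldl_flatMap, List.foldl_map, pvCast]
  rw [← h2, pv_loop_spec (fun c => (nb.getD c.1 []).getD c.2 0)]
  simp


theorem pv_center_getD (o : Option (Nat × Nat)) :
    (o.elim (none : Option (Int × Int)) (fun x => some (pvCast x))).getD (0, 0)
      = pvCast (o.getD (0, 0)) := by
  cases o <;> simp [pvCast]

-- ===== VERDICT (by name: the statement is the Claim_ definition above) =====
theorem get_neighborhood_deltas_spec : Claim_equal_get_neighborhood_deltas := by
  intro nb _ _
  unfold Spec_get_neighborhood_deltas get_neighborhood_deltas get_neighborhood_deltas_alt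
  simp only [beq_iff_eq]
  rw [pv_aux]
  simp only [pv_center_getD, List.map_map]
  simp [pvCast, Function.comp]
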